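/- GENERATED by farm/mkstatement.py from design/units.tsv (unit `start_decoder.R10d`) and the assertions of Vorbis/Spec/StartDecoderR10.lean — do not edit.
   THE STATEMENT of the proof unit `start_decoder.R10d`: segment R10d of `start_decoder` (30 instructions; entries 0x1162a1;
   exits 0x116351,0x1162f9,0x116323,0x11633b; ranges 0x1162a1-0x1162f7 + 0x11630b-0x116321 + 0x116335-0x116339 + 0x11634d-0x11634d)
   takes each of its entry assertions to one of its exit assertions (`Vorbis.Spec.StartDecoder.SegR10d`), given the contracts of its callees.
   What the names mean: Vorbis/Spec/Basic.lean (the shared hypotheses), Vorbis/Spec/StartDecoderR10.lean (the assertions). The theorem to prove: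
   `theorem start_decoder_R10d_ok : Vorbis.Spec.start_decoder_R10d.Statement`. -/
import Vorbis.Spec.StartDecoderR10
namespace Vorbis.Spec.start_decoder_R10d
open X86 X86.User Asan

/-- The statement of unit `start_decoder.R10d`. -/
def Statement : Prop :=
  ∀ (Lay : Layout) (_hLay : Lay.hi = 0x1000000) (μ : Microarch) (_hμ : UserX.MicroOK μ) (u₀ : State)
    (_hcode : HasCodeNat Lay u₀ Vorbis.L.start_decoder.entry Vorbis.Code.code_start_decoder.nat Vorbis.L.start_decoder.size)
    (_h_asan_load8_noabort : Asan.SmallCheck Lay μ Vorbis.WayInv (Vorbis.CodeOK u₀) [.rax, .rcx, .rdx] 8 Vorbis.L.__asan_load8_noabort.entry)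
    (_h_asan_store1_noabort : Asan.SmallCheck Lay μ Vorbis.WayInv (Vorbis.CodeOK u₀) [.rax, .rdx] 1 Vorbis.L.__asan_store1_noabort.entry)
    (_h_asan_load4_noabort : Asan.SmallCheck Lay μ Vorbis.WayInv (Vorbis.CodeOK u₀) [.rax, .rcx, .rdx] 4 Vorbis.L.__asan_load4_noabort.entry)
    (_h_asan_load1_noabort : Asan.SmallCheck Lay μ Vorbis.WayInv (Vorbis.CodeOK u₀) [.rax, .rdx] 1 Vorbis.L.__asan_load1_noabort.entry),
    Vorbis.Spec.StartDecoder.SegR10d Lay μ u₀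

end Vorbis.Spec.start_decoder_R10d
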